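-- pv_equiv track=rewrite | github.com/wangyanbao666/Algo-questions | animation.py | get_status
-- ===== SOURCE A (Python) =====
-- def get_status(customers):
--     num_queue = 0
--     num_look_seat = 0
--     num_eating = 0
--     num_in_hawker = 0
--
--     for customer in customers:
--         if customer[0] == 1:
--             num_in_hawker += 1
--             if customer[2] == 1:
--                 num_queue += 1
--             elif customer[2] == 2:
--                 num_look_seat += 1
--             elif customer[2] == 3:
--                 num_eating += 1
--     return num_queue, num_look_seat, num_eating, num_in_hawker
-- ===== SOURCE B (Python) =====
-- def get_status(customers):
--     states = [customer[2] for customer in customers if customer[0] == 1]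
--     return states.count(1), states.count(2), states.count(3), len(states)
-- ===== Notes on version B (the rewrite author's own statement) =====
-- stated objective: simpler
-- what changed: Replaces the four scalar counters and the if/elif dispatch with a single comprehension collecting the states of in-hawker customers, then reads the three counts off with list.count and the hawker total as its length.
import Mathlib
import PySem

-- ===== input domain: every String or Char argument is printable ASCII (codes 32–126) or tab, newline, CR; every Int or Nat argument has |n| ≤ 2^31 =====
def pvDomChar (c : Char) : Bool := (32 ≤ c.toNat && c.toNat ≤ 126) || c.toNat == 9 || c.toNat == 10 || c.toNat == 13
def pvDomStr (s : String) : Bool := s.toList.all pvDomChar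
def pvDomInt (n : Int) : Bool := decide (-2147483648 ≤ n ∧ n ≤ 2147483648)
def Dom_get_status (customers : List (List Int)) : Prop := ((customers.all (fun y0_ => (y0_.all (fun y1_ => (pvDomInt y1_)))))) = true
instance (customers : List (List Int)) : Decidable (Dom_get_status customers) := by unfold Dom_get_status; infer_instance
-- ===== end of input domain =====

-- B replaces A's four scalar counters and if/elif dispatch by one comprehension of the
-- in-hawker states, read off with list.count / len (objective: simpler; same O(n) cost).

-- ===== PORT A =====
-- A's loop body (the if/elif dispatch updating the four counters); customer[0]/customer[2]
-- via pyGetD (valid under Pre_).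
def gsStep (st : Int × Int × Int × Int) (customer : List Int) : Int × Int × Int × Int :=
  let (q, l, e, h) := st
  if PySem.List.pyGetD customer 0 0 == 1 then
    let s := PySem.List.pyGetD customer 2 0
    if s == 1 then (q + 1, l, e, h + 1)
    else if s == 2 then (q, l + 1, e, h + 1)
    else if s == 3 then (q, l, e + 1, h + 1)
    else (q, l, e, h + 1)
  else (q, l, e, h)

def get_status (customers : List (List Int)) : Int × Int × Int × Int :=
  customers.foldl gsStep (0, 0, 0, 0)

-- ===== PORT B =====
-- B's comprehension: states of the in-hawker customers, then counts and length.
def get_status_alt (customers : List (List Int)) : Int × Int × Int × Int :=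
  let states := (customers.filter (fun (customer : List Int) => PySem.List.pyGetD customer 0 0 == 1)).map
    (fun customer => PySem.List.pyGetD customer 2 0)
  ((PySem.List.count states 1 : Int), (PySem.List.count states 2 : Int),
   (PySem.List.count states 3 : Int), (states.length : Int))

-- ===== PRECONDITION & SPEC =====
-- Pre_ excludes exactly the inputs on which Python A raises IndexError: an empty inner
-- list (customer[0]) or an in-hawker customer shorter than 3 (customer[2]).
def Pre_get_status (customers : List (List Int)) : Prop :=
  ∀ c ∈ customers, c ≠ [] ∧ (c.headI = 1 → 3 ≤ c.length)
instance (customers : List (List Int)) : Decidable (Pre_get_status customers) := by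
  unfold Pre_get_status; infer_instance

def pvWitness_get_status : List (List Int) := [[1, 0, 2], [0], [1, 5, 3, 9]]

def Spec_get_status (customers : List (List Int)) (out : Int × Int × Int × Int) : Prop := out = get_status_alt customers
instance (customers : List (List Int)) (out : Int × Int × Int × Int) : Decidable (Spec_get_status customers out) := by unfold Spec_get_status; infer_instance

-- ===== CLAIM (what is proved, stated in full; the proofs are below) =====
def Claim_equal_get_status : Prop := ∀ (customers : List (List Int)), Dom_get_status customers → Pre_get_status customers → Spec_get_status customers (get_status customers)

-- ===== LEMMAS AND PROOFS =====

theorem get_status_general (customers : List (List Int)) (q l e h : Int) :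
    customers.foldl gsStep (q, l, e, h)
    = (let states := (customers.filter (fun (customer : List Int) => PySem.List.pyGetD customer 0 0 == 1)).map
        (fun customer => PySem.List.pyGetD customer 2 0)
       (q + (PySem.List.count states 1 : Int), l + (PySem.List.count states 2 : Int),
        e + (PySem.List.count states 3 : Int), h + (states.length : Int))) := by
  induction customers generalizing q l e h with
  | nil => simp [PySem.List.count]
  | cons c cs ih =>
    rw [List.foldl_cons]
    by_cases h0 : PySem.List.pyGetD c 0 0 == 1
    · by_cases h1 : PySem.List.pyGetD c 2 0 == 1
      · rw [show gsStep (q, l, e, h) c = (q + 1, l, e, h + 1) from by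
          simp [gsStep, h0, h1], ih]
        clear ih
        simp_all [List.filter_cons, PySem.List.count, List.count_cons] <;> omega
      · by_cases h2 : PySem.List.pyGetD c 2 0 == 2
        · rw [show gsStep (q, l, e, h) c = (q, l + 1, e, h + 1) from by
            simp [gsStep, h0, h1, h2], ih]
          clear ih
          simp_all [List.filter_cons, PySem.List.count, List.count_cons] <;> omega
        · by_cases h3 : PySem.List.pyGetD c 2 0 == 3
          · rw [show gsStep (q, l, e, h) c = (q, l, e + 1, h + 1) from by
              simp [gsStep, h0, h1, h2, h3], ih]
            clear ih
            simp_all [List.filter_cons, PySem.List.count, List.count_cons] <;> omega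
          · rw [show gsStep (q, l, e, h) c = (q, l, e, h + 1) from by
              simp [gsStep, h0, h1, h2, h3], ih]
            clear ih
            simp_all [List.filter_cons, PySem.List.count, List.count_cons] <;> omega
    · rw [show gsStep (q, l, e, h) c = (q, l, e, h) from by simp [gsStep, h0], ih]
      simp [List.filter_cons, h0]

-- ===== VERDICT (by name: the statement is the Claim_ definition above) =====
theorem get_status_spec : Claim_equal_get_status := by
  intro customers _ _
  unfold Spec_get_status get_status get_status_alt
  rw [get_status_general]
  simp
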